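-- pv_equiv track=rewrite | github.com/jayeshmepani/poetry-analyzer-app | app/services/additional_analysis.py | _analyze_lexical_cohesion
-- ===== SOURCE A (Python) =====
-- from typing import Dict, List, Any, Optional, Tuple
--
-- def _analyze_lexical_cohesion(words: List[str]) -> Dict[str, Any]:
--     """Analyze lexical cohesion (repetition)"""
--     from collections import Counter
--     word_freq = Counter(words)
--     repeated = sum(1 for count in word_freq.values() if count > 1)
--     return {
--         "repeated_words": repeated,
--         "count": repeated
--     }
-- ===== SOURCE B (Python) =====
-- def _analyze_lexical_cohesion(words):
--     """Analyze lexical cohesion (repetition)"""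
--     seen = set()
--     repeated = set()
--     for w in words:
--         if w in seen:
--             repeated.add(w)
--         else:
--             seen.add(w)
--     n = len(repeated)
--     return {
--         "repeated_words": n,
--         "count": n
--     }
-- ===== Notes on version B (the rewrite author's own statement) =====
-- stated objective: alternative
-- what changed: Replaces the Counter-build-then-scan-values approach with a single pass that keeps two sets (seen, repeated): a word is added to repeated on its second occurrence, so no per-word frequencies are kept and the separate value scan disappears.
import Mathlib
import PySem

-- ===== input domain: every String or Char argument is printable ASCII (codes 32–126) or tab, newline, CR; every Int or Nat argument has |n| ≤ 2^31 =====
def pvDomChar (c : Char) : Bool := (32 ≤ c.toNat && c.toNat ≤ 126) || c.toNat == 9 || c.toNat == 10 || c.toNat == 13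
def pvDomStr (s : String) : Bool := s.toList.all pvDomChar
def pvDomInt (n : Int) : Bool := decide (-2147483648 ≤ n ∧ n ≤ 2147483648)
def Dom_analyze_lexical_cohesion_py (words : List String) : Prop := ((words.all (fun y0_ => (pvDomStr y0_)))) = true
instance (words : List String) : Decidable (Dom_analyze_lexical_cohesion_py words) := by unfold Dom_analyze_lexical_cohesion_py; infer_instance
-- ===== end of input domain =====

-- B replaces A's Counter-then-scan-values with a single pass keeping two sets (seen, repeated); same O(n) cost, different data maintained.


-- ===== PORT A =====
-- word_freq = Counter(words); repeated = sum(1 for count in word_freq.values() if count > 1)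
def analyze_lexical_cohesion_py (words : List String) : List (String × Int) :=
  let word_freq : PySem.Dict String Int := PySem.Dict.counter words
  let repeated : Int := (word_freq.values.map (fun count => if 1 < count then (1 : Int) else 0)).sum
  [("repeated_words", repeated), ("count", repeated)]

-- ===== PORT B =====
-- one pass: seen/repeated sets; a word joins `repeated` on its second occurrence
def analyze_lexical_cohesion_py_alt (words : List String) : List (String × Int) :=
  let st : PySem.Set String × PySem.Set String :=
    words.foldl
      (fun st w =>
        if PySem.Set.contains st.1 w then (st.1, PySem.Set.add st.2 w)
        else (PySem.Set.add st.1 w, st.2))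
      (PySem.Set.empty, PySem.Set.empty)
  let n : Int := (PySem.Set.len st.2 : Int)
  [("repeated_words", n), ("count", n)]

-- ===== PRECONDITION & SPEC =====
def Spec_analyze_lexical_cohesion_py (words : List String) (out : List (String × Int)) : Prop := out = analyze_lexical_cohesion_py_alt words
instance (words : List String) (out : List (String × Int)) : Decidable (Spec_analyze_lexical_cohesion_py words out) := by unfold Spec_analyze_lexical_cohesion_py; infer_instance

-- ===== CLAIM (what is proved, stated in full; the proofs are below) =====
def Claim_equal_analyze_lexical_cohesion_py : Prop := ∀ (words : List String), Dom_analyze_lexical_cohesion_py words → Spec_analyze_lexical_cohesion_py words (analyze_lexical_cohesion_py words)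

-- ===== LEMMAS AND PROOFS =====

-- B's loop, as a standalone function for reasoning
def pvLoop (ws : List String) (st : PySem.Set String × PySem.Set String) :
    PySem.Set String × PySem.Set String :=
  ws.foldl
    (fun st w =>
      if PySem.Set.contains st.1 w then (st.1, PySem.Set.add st.2 w)
      else (PySem.Set.add st.1 w, st.2))
    st

lemma pvLoop_rep_nodup (ws : List String) :
    ∀ st : PySem.Set String × PySem.Set String, st.2.Nodup → (pvLoop ws st).2.Nodup := by
  induction ws with
  | nil => intro st h; exact h
  | cons w ws ih =>
    intro st h
    simp only [pvLoop, List.foldl_cons] at ih ⊢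
    split
    · exact ih _ (PySem.Set.nodup_add st.2 w h)
    · exact ih _ h

lemma pvLoop_rep_mem (ws : List String) :
    ∀ (seen rep : PySem.Set String) (x : String),
      x ∈ (pvLoop ws (seen, rep)).2 ↔ x ∈ rep ∨ (x ∈ ws ∧ (x ∈ seen ∨ 2 ≤ ws.count x)) := by
  induction ws with
  | nil => intro seen rep x; simp [pvLoop]
  | cons w ws ih =>
    intro seen rep x
    simp only [pvLoop, List.foldl_cons]
    have hcnt : x ∈ ws ↔ 1 ≤ ws.count x := by
      rw [← List.count_pos_iff]; omega
    by_cases hw : w ∈ seen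
    · rw [if_pos ((PySem.Set.contains_iff seen w).2 hw)]
      rw [show (ws.foldl (fun st w =>
            if PySem.Set.contains st.1 w then (st.1, PySem.Set.add st.2 w)
            else (PySem.Set.add st.1 w, st.2)) (seen, PySem.Set.add rep w))
          = pvLoop ws (seen, PySem.Set.add rep w) from rfl, ih]
      by_cases hxw : x = w
      · subst hxw; simp [PySem.Set.mem_add, hw]
      · simp only [PySem.Set.mem_add, List.mem_cons, List.count_cons, beq_iff_eq]
        rw [if_neg (fun h => hxw h.symm)]
        constructor
        · rintro ((h | h) | ⟨h1, h2⟩)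
          · exact Or.inl h
          · exact absurd h hxw
          · exact Or.inr ⟨Or.inr h1, by simpa using h2⟩
        · rintro (h | ⟨h1, h2⟩)
          · exact Or.inl (Or.inl h)
          · exact Or.inr ⟨h1.resolve_left hxw, by simpa using h2⟩
    · rw [if_neg (fun hc => hw ((PySem.Set.contains_iff seen w).1 hc))]
      rw [show (ws.foldl (fun st w =>
            if PySem.Set.contains st.1 w then (st.1, PySem.Set.add st.2 w)
            else (PySem.Set.add st.1 w, st.2)) (PySem.Set.add seen w, rep))
          = pvLoop ws (PySem.Set.add seen w, rep) from rfl, ih]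
      by_cases hxw : x = w
      · subst hxw
        have hadd : x ∈ PySem.Set.add seen x := by rw [PySem.Set.mem_add]; exact Or.inr rfl
        have hcc : (x :: ws).count x = ws.count x + 1 := by simp
        constructor
        · rintro (h | ⟨hws, _⟩)
          · exact Or.inl h
          · exact Or.inr ⟨List.mem_cons_self, Or.inr (by rw [hcc]; have := hcnt.1 hws; omega)⟩
        · rintro (h | ⟨_, hs | hc⟩)
          · exact Or.inl h
          · exact absurd hs hw
          · exact Or.inr ⟨hcnt.2 (by rw [hcc] at hc; omega), Or.inl hadd⟩
      · simp only [PySem.Set.mem_add, List.mem_cons, List.count_cons, beq_iff_eq]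
        rw [if_neg (fun h => hxw h.symm)]
        constructor
        · rintro (h | ⟨h1, h2⟩)
          · exact Or.inl h
          · rcases h2 with (h2 | h2) | h2
            · exact Or.inr ⟨Or.inr h1, Or.inl h2⟩
            · exact absurd h2 hxw
            · exact Or.inr ⟨Or.inr h1, Or.inr (by omega)⟩
        · rintro (h | ⟨h1, h2⟩)
          · exact Or.inl h
          · rcases h2 with h2 | h2
            · exact Or.inr ⟨h1.resolve_left hxw, Or.inl (Or.inl h2)⟩
            · exact Or.inr ⟨h1.resolve_left hxw, Or.inr (by omega)⟩

-- A's value-scan equals the length of B's repeated set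
lemma pv_main (words : List String) :
    ((PySem.Dict.counter words).values.map (fun count => if 1 < count then (1 : Int) else 0)).sum
      = ((pvLoop words (PySem.Set.empty, PySem.Set.empty)).2.length : Int) := by
  have hv : (PySem.Dict.counter words).values
      = (PySem.Set.ofList words).map (fun k => ((words.count k : Nat) : Int)) := by
    simp only [PySem.Dict.values, PySem.Dict.items_counter, List.map_map]
    rfl
  rw [hv, List.map_map]
  have : ((fun count => if 1 < count then (1 : Int) else 0) ∘ fun k => ((words.count k : Nat) : Int))
      = fun k => if (decide (2 ≤ words.count k) : Bool) then (1 : Int) else 0 := by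
    funext k
    by_cases h : 2 ≤ words.count k
    · simp [h]; omega
    · simp [h]; omega
  rw [this, PySem.List.sum_map_ite_one_zero]
  congr 1
  rw [List.countP_eq_length_filter]
  have hperm : ((PySem.Set.ofList words).filter (fun k => decide (2 ≤ words.count k))).Perm
      (pvLoop words (PySem.Set.empty, PySem.Set.empty)).2 := by
    rw [List.perm_ext_iff_of_nodup
      (List.Nodup.filter _ (PySem.Set.nodup_ofList words))
      (pvLoop_rep_nodup words _ List.nodup_nil)]
    intro a
    rw [List.mem_filter, PySem.Set.mem_ofList, pvLoop_rep_mem]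
    simp [PySem.Set.empty]
  exact hperm.length_eq

-- ===== VERDICT (by name: the statement is the Claim_ definition above) =====
theorem analyze_lexical_cohesion_py_spec : Claim_equal_analyze_lexical_cohesion_py := by
  intro words _
  show analyze_lexical_cohesion_py words = analyze_lexical_cohesion_py_alt words
  simp only [analyze_lexical_cohesion_py, analyze_lexical_cohesion_py_alt]
  rw [pv_main]
  rfl
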